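-- pv_equiv track=rewrite | github.com/richfitz/advent-of-code | 2023/d02.py | part2
-- ===== SOURCE A (Python) =====
-- from collections import defaultdict
--
-- def part2(d):
--     def power(game):
--         res = defaultdict(lambda : 0)
--         for g in game:
--             for col in g.keys():
--                 res[col] = max(res[col], g[col])
--         r, g, b = res.values()
--         return r * g * b
--     return sum(power(game[1]) for game in d)
-- ===== SOURCE B (Python) =====
-- def max_count(game, col):
--     m = 0
--     for sub in game:
--         m = max(m, sub.get(col, 0))
--     return m
--
-- def part2(d):
--     total = 0
--     for game_id, game in d:
--         colors = []
--         for sub in game: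
--             for col in sub:
--                 if col not in colors:
--                     colors.append(col)
--         r, g, b = (max_count(game, col) for col in colors)
--         total += r * g * b
--     return total
-- ===== Notes on version B (the rewrite author's own statement) =====
-- stated objective: alternative
-- what changed: A makes one accumulating pass per game maintaining a defaultdict of running maxima; B first collects the ordered union of colors, then computes each color's maximum by a separate rescan of the game's subsets, summing with an explicit accumulator.
import Mathlib
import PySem

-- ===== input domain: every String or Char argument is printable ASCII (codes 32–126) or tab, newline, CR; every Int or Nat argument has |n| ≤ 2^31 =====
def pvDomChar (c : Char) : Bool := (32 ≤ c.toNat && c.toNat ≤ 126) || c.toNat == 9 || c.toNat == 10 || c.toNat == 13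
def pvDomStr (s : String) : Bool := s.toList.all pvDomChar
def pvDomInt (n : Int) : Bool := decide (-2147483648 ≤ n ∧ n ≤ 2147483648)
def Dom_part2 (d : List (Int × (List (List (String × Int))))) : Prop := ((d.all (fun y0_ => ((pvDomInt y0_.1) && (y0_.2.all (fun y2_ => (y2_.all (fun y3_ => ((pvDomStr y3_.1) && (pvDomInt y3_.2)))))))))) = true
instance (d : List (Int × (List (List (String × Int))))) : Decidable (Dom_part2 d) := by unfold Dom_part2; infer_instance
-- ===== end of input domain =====

-- B replaces A's single accumulating defaultdict pass by an ordered color-union pass plus a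
-- per-color rescan of the subsets (alternative decomposition, similar cost).

-- ===== PORT A =====
-- power(game): defaultdict of running maxima, then unpack exactly three values
def pvPowerA (game : List (List (String × Int))) : Int :=
  let res := game.foldl
    (fun (res : PySem.Dict String Int) g =>
      let gd := PySem.Dict.ofList g
      gd.keys.foldl (fun res col => res.insert col (max (res.getD col 0) (gd.getD col 0))) res)
    PySem.Dict.empty
  match res.values with
  | [r, g, b] => r * g * b
  | _ => 0  -- Python raises ValueError here (unpacking ≠ 3 values); excluded by Pre_part2

def part2 (d : List (Int × (List (List (String × Int))))) : Int :=
  (d.map (fun game => pvPowerA game.2)).sum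

-- ===== PORT B =====
def pvMaxCount (game : List (PySem.Dict String Int)) (col : String) : Int :=
  game.foldl (fun m sub => max m (sub.getD col 0)) 0

def part2_alt (d : List (Int × (List (List (String × Int))))) : Int :=
  d.foldl (fun total game =>
    let subs := game.2.map PySem.Dict.ofList
    let colors := subs.foldl (fun cs sub => sub.keys.foldl PySem.Set.add cs) ([] : List String)
    match colors.map (fun col => pvMaxCount subs col) with
    | [r, g, b] => total + r * g * b
    | _ => total)  -- Python raises ValueError here; excluded by Pre_part2
    0

-- ===== PRECONDITION & SPEC =====
-- Pre_ excludes exactly the inputs on which both Pythons raise ValueError: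
-- games whose number of distinct colors across all subsets is not exactly 3.
def Pre_part2 (d : List (Int × (List (List (String × Int))))) : Prop :=
  ∀ p ∈ d, (PySem.Set.ofList (p.2.flatMap (fun sub => sub.map Prod.fst))).length = 3
instance (d : List (Int × (List (List (String × Int))))) : Decidable (Pre_part2 d) := by unfold Pre_part2; infer_instance
def pvWitness_part2 : (List (Int × (List (List (String × Int))))) :=
  [(1, [[("red", 4), ("green", 2)], [("blue", 6), ("green", 3)]]), (2, [[("red", 1), ("green", 1), ("blue", 1)]])]

def Spec_part2 (d : List (Int × (List (List (String × Int))))) (out : Int) : Prop := out = part2_alt d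
instance (d : List (Int × (List (List (String × Int))))) (out : Int) : Decidable (Spec_part2 d out) := by unfold Spec_part2; infer_instance

-- ===== CLAIM (what is proved, stated in full; the proofs are below) =====
def Claim_equal_part2 : Prop := ∀ (d : List (Int × (List (List (String × Int))))), Dom_part2 d → Pre_part2 d → Spec_part2 d (part2 d)

-- ===== LEMMAS AND PROOFS =====

-- inner loop of A: getD after folding distinct keys
lemma getD_foldl_insert_max (ks : List String) (v : String → Int) (res : PySem.Dict String Int)
    (hnd : ks.Nodup) (c : String) :
    (ks.foldl (fun r col => r.insert col (max (r.getD col 0) (v col))) res).getD c 0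
      = if c ∈ ks then max (res.getD c 0) (v c) else res.getD c 0 := by
  induction ks generalizing res with
  | nil => simp
  | cons k ks ih =>
    simp only [List.nodup_cons] at hnd
    simp only [List.foldl_cons, ih _ hnd.2, List.mem_cons]
    by_cases hc : c ∈ ks
    · have hck : c ≠ k := fun h => hnd.1 (h ▸ hc)
      simp [hc, hck, PySem.Dict.getD_insert]
    · by_cases hck : c = k <;> simp [hc, hck, PySem.Dict.getD_insert]

-- A's per-game fold step, named for the proofs
def pvAstep (res : PySem.Dict String Int) (g : List (String × Int)) : PySem.Dict String Int :=
  let gd := PySem.Dict.ofList g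
  gd.keys.foldl (fun res col => res.insert col (max (res.getD col 0) (gd.getD col 0))) res

lemma pvPowerA_eq_fold (game : List (List (String × Int))) :
    pvPowerA game = (match (game.foldl pvAstep PySem.Dict.empty).values with
      | [r, g, b] => r * g * b | _ => 0) := rfl

lemma keys_pvAstep (res : PySem.Dict String Int) (g : List (String × Int)) :
    (pvAstep res g).keys = PySem.Set.update res.keys (PySem.Dict.ofList g).keys :=
  PySem.Dict.keys_foldl_insert _ _ _

lemma nodup_keys_foldl_pvAstep (game : List (List (String × Int))) (res : PySem.Dict String Int)
    (h : res.keys.Nodup) : (game.foldl pvAstep res).keys.Nodup := by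
  induction game generalizing res with
  | nil => exact h
  | cons g game ih => exact ih _ (PySem.Dict.nodup_keys_foldl_insert _ _ _ h)

lemma getD_foldl_pvAstep (game : List (List (String × Int))) (res : PySem.Dict String Int)
    (c : String) (h0 : 0 ≤ res.getD c 0) :
    (game.foldl pvAstep res).getD c 0
      = game.foldl (fun m g => max m ((PySem.Dict.ofList g).getD c 0)) (res.getD c 0) := by
  induction game generalizing res with
  | nil => rfl
  | cons g game ih =>
    have hstep : (pvAstep res g).getD c 0 = max (res.getD c 0) ((PySem.Dict.ofList g).getD c 0) := by
      rw [pvAstep, getD_foldl_insert_max _ _ _ (PySem.Dict.nodup_keys_ofList _) c]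
      by_cases hc : c ∈ (PySem.Dict.ofList g).keys
      · simp [hc]
      · have : (PySem.Dict.ofList g).getD c 0 = 0 := by
          apply PySem.Dict.getD_of_not_contains
          simp only [← Bool.not_eq_true, PySem.Dict.contains_iff_mem_keys]
          exact hc
        simp [hc, this, max_eq_left h0]
    rw [List.foldl_cons, List.foldl_cons, ih _ (hstep ▸ le_max_of_le_left h0), hstep]

lemma colors_eq_keys (game : List (List (String × Int))) :
    (game.map PySem.Dict.ofList).foldl (fun cs sub => sub.keys.foldl PySem.Set.add cs) ([] : List String)
      = (game.foldl pvAstep PySem.Dict.empty).keys := by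
  rw [List.foldl_map]
  have : ∀ (res : PySem.Dict String Int),
      (game.foldl pvAstep res).keys
        = game.foldl (fun cs g => ((PySem.Dict.ofList g).keys).foldl PySem.Set.add cs) res.keys := by
    intro res
    induction game generalizing res with
    | nil => rfl
    | cons g game ih =>
      rw [List.foldl_cons, List.foldl_cons, ih, keys_pvAstep, PySem.Set.update]
  rw [this PySem.Dict.empty]; rfl

lemma values_eq_map_maxCount (game : List (List (String × Int))) :
    (game.foldl pvAstep PySem.Dict.empty).values
      = ((game.map PySem.Dict.ofList).foldl (fun cs sub => sub.keys.foldl PySem.Set.add cs) ([] : List String)).map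
          (fun col => pvMaxCount (game.map PySem.Dict.ofList) col) := by
  rw [colors_eq_keys,
    PySem.Dict.values_eq_map_keys _ (nodup_keys_foldl_pvAstep game _ PySem.Dict.nodup_keys_empty) 0]
  apply List.map_congr_left
  intro c _
  rw [getD_foldl_pvAstep game _ c (by simp [PySem.Dict.getD_empty]), pvMaxCount, List.foldl_map]
  simp [PySem.Dict.getD_empty]

lemma power_eq (game : List (List (String × Int))) :
    (fun total => match ((game.map PySem.Dict.ofList).foldl (fun cs sub => sub.keys.foldl PySem.Set.add cs) ([] : List String)).map
          (fun col => pvMaxCount (game.map PySem.Dict.ofList) col) with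
      | [r, g, b] => total + r * g * b | _ => total)
      = fun total => total + pvPowerA game := by
  funext total
  rw [pvPowerA_eq_fold, values_eq_map_maxCount]
  cases h : ((game.map PySem.Dict.ofList).foldl (fun cs sub => sub.keys.foldl PySem.Set.add cs) ([] : List String)).map
      (fun col => pvMaxCount (game.map PySem.Dict.ofList) col) with
  | nil => simp
  | cons r t => cases t with
    | nil => simp
    | cons g t => cases t with
      | nil => simp
      | cons b t => cases t <;> simp

lemma foldl_eq_sum (d : List (Int × (List (List (String × Int))))) (init : Int) :
    d.foldl (fun total game =>
      let subs := game.2.map PySem.Dict.ofList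
      let colors := subs.foldl (fun cs sub => sub.keys.foldl PySem.Set.add cs) ([] : List String)
      match colors.map (fun col => pvMaxCount subs col) with
      | [r, g, b] => total + r * g * b | _ => total) init
    = init + (d.map (fun game => pvPowerA game.2)).sum := by
  induction d generalizing init with
  | nil => simp
  | cons p d ih =>
    rw [List.foldl_cons, ih]
    have h := congrFun (power_eq p.2) init
    simp only [] at h ⊢
    rw [h, List.map_cons, List.sum_cons]
    ring

-- ===== VERDICT (by name: the statement is the Claim_ definition above) =====
theorem part2_spec : Claim_equal_part2 := by
  intro d _ _
  unfold Spec_part2 part2 part2_alt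
  rw [foldl_eq_sum, zero_add]
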